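-- pv_equiv track=rewrite | github.com/majiang213/kwcode | kaiwu/memory/pattern_md.py | _trim_reflection_sections
-- ===== SOURCE A (Python) =====
-- def _trim_reflection_sections(content: str, max_entries: int) -> str:
--     """每个section只保留最新的max_entries条。"""
--     lines = content.splitlines()
--     result = []
--     current_section_entries = 0
--     in_section = False
--
--     for line in lines:
--         if line.startswith("## "):
--             in_section = True
--             current_section_entries = 0
--             result.append(line)
--         elif in_section and line.startswith("- ["):
--             current_section_entries += 1
--             if current_section_entries <= max_entries:
--                 result.append(line)
--         else:
--             result.append(line)
--
--     return "\n".join(result)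
-- ===== SOURCE B (Python) =====
-- def _trim_reflection_sections(content: str, max_entries: int) -> str:
--     """Group lines into preamble + '## '-headed sections, then trim each group independently."""
--     lines = content.splitlines()
--     groups = [[]]
--     for line in lines:
--         if line.startswith("## "):
--             groups.append([])
--         groups[-1].append(line)
--     out = list(groups[0])
--     for group in groups[1:]:
--         ranks = []
--         seen = 0
--         for line in group:
--             if line.startswith("- ["):
--                 seen += 1
--             ranks.append(seen)
--         out.extend(l for l, r in zip(group, ranks)
--                    if not l.startswith("- [") or r <= max_entries)
--     return "\n".join(out)
-- ===== Notes on version B (the rewrite author's own statement) =====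
-- stated objective: alternative
-- what changed: Replaces A's single stateful pass (in_section flag + counter reset on each header) by a two-phase decomposition: first split the lines into a preamble group and '## '-headed section groups, then trim each group independently via an entry-rank prefix scan and a zip/filter.
import Mathlib
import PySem

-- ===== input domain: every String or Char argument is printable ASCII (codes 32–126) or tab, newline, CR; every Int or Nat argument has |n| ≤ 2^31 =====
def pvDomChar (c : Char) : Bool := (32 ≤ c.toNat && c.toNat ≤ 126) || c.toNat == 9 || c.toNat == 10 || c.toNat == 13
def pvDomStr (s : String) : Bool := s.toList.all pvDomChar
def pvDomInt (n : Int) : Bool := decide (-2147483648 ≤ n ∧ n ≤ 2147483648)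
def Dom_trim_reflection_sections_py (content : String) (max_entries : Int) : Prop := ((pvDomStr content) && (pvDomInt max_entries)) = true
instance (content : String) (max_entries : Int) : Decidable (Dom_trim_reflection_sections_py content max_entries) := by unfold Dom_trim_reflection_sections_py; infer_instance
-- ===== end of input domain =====

-- B re-decomposes A's one-pass state machine as: split the lines into preamble + '## '-headed
-- groups, then trim each group independently by an entry-rank scan and a filter (objective: alternative).

-- ===== PORT A =====
-- literal transliteration of A's single loop over lines with state (result, count, in_section)
def trim_reflection_sections_py (content : String) (max_entries : Int) : String :=
  let lines := PySem.Str.splitlines content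
  let st := lines.foldl (fun (st : List String × Int × Bool) line =>
      let result := st.1
      let current_section_entries := st.2.1
      let in_section := st.2.2
      if PySem.Str.startswith line "## " then
        (result ++ [line], 0, true)
      else if in_section && PySem.Str.startswith line "- [" then
        let current_section_entries := current_section_entries + 1
        (if current_section_entries ≤ max_entries then result ++ [line] else result,
         current_section_entries, in_section)
      else
        (result ++ [line], current_section_entries, in_section))
    ([], 0, false)
  PySem.Str.join "\n" st.1

-- ===== PORT B =====
-- grouping loop of B: `done` = finished groups, `cur` = groups[-1]
def bSplitGo (ls : List String) (done : List (List String)) (cur : List String) :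
    List (List String) :=
  match ls with
  | [] => done ++ [cur]
  | l :: ls =>
    if PySem.Str.startswith l "## " then bSplitGo ls (done ++ [cur]) [l]
    else bSplitGo ls done (cur ++ [l])

-- B's entry-rank scan: running count of '- [' lines, one rank per line
def bRanks (ls : List String) (seen : Int) : List Int :=
  match ls with
  | [] => []
  | l :: ls =>
    let seen := if PySem.Str.startswith l "- [" then seen + 1 else seen
    seen :: bRanks ls seen

-- B's per-group trim: keep non-entries and the entries of rank ≤ max_entries
def bTrimGroup (g : List String) (max_entries : Int) : List String :=
  ((g.zip (bRanks g 0)).filter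
    (fun p => !(PySem.Str.startswith p.1 "- [") || decide (p.2 ≤ max_entries))).map Prod.fst

def trim_reflection_sections_py_alt (content : String) (max_entries : Int) : String :=
  let lines := PySem.Str.splitlines content
  let groups := bSplitGo lines [] []
  let out := groups.tail.foldl (fun out g => out ++ bTrimGroup g max_entries) groups.headI
  PySem.Str.join "\n" out

-- ===== PRECONDITION & SPEC =====
def Spec_trim_reflection_sections_py (content : String) (max_entries : Int) (out : String) : Prop := out = trim_reflection_sections_py_alt content max_entries
instance (content : String) (max_entries : Int) (out : String) : Decidable (Spec_trim_reflection_sections_py content max_entries out) := by unfold Spec_trim_reflection_sections_py; infer_instance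

-- ===== CLAIM (what is proved, stated in full; the proofs are below) =====
def Claim_equal_trim_reflection_sections_py : Prop := ∀ (content : String) (max_entries : Int), Dom_trim_reflection_sections_py content max_entries → Spec_trim_reflection_sections_py content max_entries (trim_reflection_sections_py content max_entries)

-- ===== LEMMAS AND PROOFS =====

-- a line starting with "## " does not start with "- ["
theorem header_not_entry (l : String)
    (h : PySem.Chars.startswith l.toList ['#','#',' '] = true) :
    PySem.Chars.startswith l.toList ['-',' ','['] = false := by
  cases hb : PySem.Chars.startswith l.toList ['-',' ','[']
  · rfl
  · exfalso
    rw [PySem.Chars.startswith_iff] at h hb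
    rcases List.prefix_or_prefix_of_prefix h hb with h' | h' <;> revert h' <;> decide

-- proof-side view of A's loop: the lines it emits from a given state
def emitA (max_entries : Int) (ls : List String) (cnt : Int) (insec : Bool) : List String :=
  match ls with
  | [] => []
  | l :: ls =>
    if PySem.Str.startswith l "## " then l :: emitA max_entries ls 0 true
    else if insec && PySem.Str.startswith l "- [" then
      (if cnt + 1 ≤ max_entries then [l] else []) ++ emitA max_entries ls (cnt + 1) insec
    else l :: emitA max_entries ls cnt insec

-- proof-side view of B's grouping: (current/preamble group, later groups), built from the right
def bSplitP (ls : List String) : List String × List (List String) :=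
  match ls with
  | [] => ([], [])
  | l :: ls =>
    let r := bSplitP ls
    if PySem.Str.startswith l "## " then ([], (l :: r.1) :: r.2) else (l :: r.1, r.2)

-- proof-side view of B's per-group trim, with the entry counter threaded
def trimGo (max_entries : Int) (ls : List String) (cnt : Int) : List String :=
  match ls with
  | [] => []
  | l :: ls =>
    if PySem.Str.startswith l "- [" then
      (if cnt + 1 ≤ max_entries then [l] else []) ++ trimGo max_entries ls (cnt + 1)
    else l :: trimGo max_entries ls cnt

theorem foldlA_eq_emitA (max_entries : Int) (ls : List String) (res : List String)
    (cnt : Int) (insec : Bool) :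
    (ls.foldl (fun (st : List String × Int × Bool) line =>
      let result := st.1
      let current_section_entries := st.2.1
      let in_section := st.2.2
      if PySem.Str.startswith line "## " then
        (result ++ [line], 0, true)
      else if in_section && PySem.Str.startswith line "- [" then
        let current_section_entries := current_section_entries + 1
        (if current_section_entries ≤ max_entries then result ++ [line] else result,
         current_section_entries, in_section)
      else
        (result ++ [line], current_section_entries, in_section))
      (res, cnt, insec)).1 = res ++ emitA max_entries ls cnt insec := by
  induction ls generalizing res cnt insec with
  | nil => simp [emitA]
  | cons l ls ih =>
    by_cases h1 : PySem.Chars.startswith l.toList ['#','#',' '] = true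
    · simp [List.foldl_cons, emitA, h1]
      simpa using ih (res ++ [l]) 0 true
    · by_cases hi : insec = true
      · by_cases h2 : PySem.Chars.startswith l.toList ['-',' ','['] = true
        · by_cases h3 : cnt < max_entries
          · simp [List.foldl_cons, emitA, h1, hi, h2, h3]
            simpa using ih (res ++ [l]) (cnt + 1) true
          · simp [List.foldl_cons, emitA, h1, hi, h2, h3]
            simpa using ih res (cnt + 1) true
        · simp [List.foldl_cons, emitA, h1, hi, h2]
          simpa using ih (res ++ [l]) cnt true
      · simp [List.foldl_cons, emitA, h1, hi]
        simpa using ih (res ++ [l]) cnt false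

theorem bSplitGo_eq (ls : List String) (done : List (List String)) (cur : List String) :
    bSplitGo ls done cur = done ++ (cur ++ (bSplitP ls).1) :: (bSplitP ls).2 := by
  induction ls generalizing done cur with
  | nil => simp [bSplitGo, bSplitP]
  | cons l ls ih =>
    by_cases h : PySem.Chars.startswith l.toList ['#','#',' '] = true
    · simp [bSplitGo, bSplitP, h, ih]
    · simp [bSplitGo, bSplitP, h, ih]

theorem bTrim_eq_trimGo (max_entries : Int) (g : List String) (cnt : Int) :
    ((g.zip (bRanks g cnt)).filter
      (fun p => !(PySem.Str.startswith p.1 "- [") || decide (p.2 ≤ max_entries))).map Prod.fst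
      = trimGo max_entries g cnt := by
  induction g generalizing cnt with
  | nil => simp [bRanks, trimGo]
  | cons l ls ih =>
    by_cases h : PySem.Chars.startswith l.toList ['-',' ','['] = true
    · by_cases h2 : cnt < max_entries
      · simp [bRanks, trimGo, h, h2]
        simpa using ih (cnt + 1)
      · simp [bRanks, trimGo, h, h2]
        simpa using ih (cnt + 1)
    · simp [bRanks, trimGo, h]
      simpa using ih cnt

theorem bTrimGroup_eq (max_entries : Int) (g : List String) :
    bTrimGroup g max_entries = trimGo max_entries g 0 :=
  bTrim_eq_trimGo max_entries g 0

theorem emitA_sec (max_entries : Int) (ls : List String) (cnt : Int) :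
    emitA max_entries ls cnt true
      = trimGo max_entries (bSplitP ls).1 cnt
        ++ ((bSplitP ls).2).flatMap (fun g => trimGo max_entries g 0) := by
  induction ls generalizing cnt with
  | nil => simp [emitA, bSplitP, trimGo]
  | cons l ls ih =>
    by_cases h1 : PySem.Chars.startswith l.toList ['#','#',' '] = true
    · simp [emitA, bSplitP, trimGo, h1, header_not_entry l h1, ih]
    · by_cases h2 : PySem.Chars.startswith l.toList ['-',' ','['] = true
      · by_cases h3 : cnt < max_entries <;>
          simp [emitA, bSplitP, trimGo, h1, h2, h3, ih]
      · simp [emitA, bSplitP, trimGo, h1, h2, ih]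

theorem emitA_pre (max_entries : Int) (ls : List String) :
    emitA max_entries ls 0 false
      = (bSplitP ls).1 ++ ((bSplitP ls).2).flatMap (fun g => trimGo max_entries g 0) := by
  induction ls with
  | nil => simp [emitA, bSplitP]
  | cons l ls ih =>
    by_cases h1 : PySem.Chars.startswith l.toList ['#','#',' '] = true
    · simp [emitA, bSplitP, trimGo, h1, header_not_entry l h1, emitA_sec]
    · simp [emitA, bSplitP, h1, ih]

-- ===== VERDICT (by name: the statement is the Claim_ definition above) =====
theorem trim_reflection_sections_py_spec : Claim_equal_trim_reflection_sections_py := by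
  intro content max_entries _
  unfold Spec_trim_reflection_sections_py
  simp only [trim_reflection_sections_py, trim_reflection_sections_py_alt]
  rw [foldlA_eq_emitA, bSplitGo_eq, PySem.List.foldl_append_eq_flatMap]
  simp [bTrimGroup_eq, emitA_pre]
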